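-- pv_equiv track=rewrite | github.com/paveenH/AIcup | data_processing/data_processing_task2.py | concatenate_validation
-- ===== SOURCE A (Python) =====
-- def append_length(line):
--     length = len(line)
--     current_content = line.strip()
--     while len(current_content) < length:
--         current_content += " "
--     return current_content
--
-- def concatenate_validation(lines, max_length=256):
--     concatenated_data = []
--     initial_length = []
--
--     for i in range(len(lines)):
--         current_content = append_length(lines[i])
--         initial_length.append(len(lines[i]))
--
--         j = i + 1
--         while j < len(lines):
--             next_line = append_length(lines[j])
--             new_content = current_content + next_line
--
--             if len(new_content) < max_length:
--                 current_content = new_content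
--             else:
--                 break
--
--             j += 1
--
--         concatenated_data.append(current_content)
--
--     return concatenated_data, initial_length
-- ===== SOURCE B (Python) =====
-- def concatenate_validation(lines, max_length=256):
--     # Pad once, build a prefix-sum table of line lengths, and find each group's
--     # endpoint by binary search instead of re-concatenating incrementally.
--     n = len(lines)
--     padded = [l.strip().ljust(len(l)) for l in lines]
--     S = [0]
--     for l in lines:
--         S.append(S[-1] + len(l))
--     concatenated_data = []
--     initial_length = []
--     for i in range(n):
--         target = S[i] + max_length
--         lo, hi = 0, len(S)
--         while lo < hi:
--             mid = (lo + hi) // 2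
--             if S[mid] < target:
--                 lo = mid + 1
--             else:
--                 hi = mid
--         e = lo - 2
--         if e < i:
--             e = i
--         concatenated_data.append(''.join(padded[i:e + 1]))
--         initial_length.append(len(lines[i]))
--     return concatenated_data, initial_length
-- ===== Notes on version B (the rewrite author's own statement) =====
-- stated objective: faster
-- what changed: Replaces the per-start incremental string re-concatenation (greedy inner while over strings) by a one-time padded list plus a prefix-sum table of line lengths, locating each group's endpoint with a hand-written binary search and joining one slice.
import Mathlib
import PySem

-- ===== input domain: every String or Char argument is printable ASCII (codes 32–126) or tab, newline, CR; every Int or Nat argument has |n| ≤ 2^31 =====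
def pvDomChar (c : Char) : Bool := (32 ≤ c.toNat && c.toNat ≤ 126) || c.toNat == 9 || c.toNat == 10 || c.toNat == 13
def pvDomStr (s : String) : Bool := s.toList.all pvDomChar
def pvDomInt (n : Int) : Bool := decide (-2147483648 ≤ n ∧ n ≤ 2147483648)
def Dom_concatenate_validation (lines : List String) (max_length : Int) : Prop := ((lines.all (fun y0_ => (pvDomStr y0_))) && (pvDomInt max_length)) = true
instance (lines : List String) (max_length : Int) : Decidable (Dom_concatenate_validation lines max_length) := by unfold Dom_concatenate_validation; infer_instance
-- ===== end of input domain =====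

-- B replaces A's per-start incremental string re-concatenation by a padded list + prefix-sum
-- table of line lengths and a binary search for each group's endpoint (objective: faster).

-- ===== PORT A =====

-- append_length's while loop: while len(current_content) < length: current_content += " "
def pvPadLoopA (c : List Char) (length : Nat) : List Char :=
  if _h : c.length < length then pvPadLoopA (c ++ [' ']) length else c
  termination_by length - c.length
  decreasing_by simp; omega

def pvAppendLengthA (line : List Char) : List Char :=
  pvPadLoopA (PySem.Chars.strip line) line.length

-- the inner 'while j < len(lines)' loop of A
def pvInnerA (ls : List (List Char)) (max_length : Int) (cur : List Char) (j : Nat) : List Char :=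
  if h : j < ls.length then
    if ((cur ++ pvAppendLengthA ls[j]).length : Int) < max_length then
      pvInnerA ls max_length (cur ++ pvAppendLengthA ls[j]) (j + 1)
    else cur
  else cur
  termination_by ls.length - j

def concatenate_validation (lines : List String) (max_length : Int) : List String × List Int :=
  let ls := lines.map String.toList
  let res := (List.range ls.length).foldl
    (fun (acc : List (List Char) × List Int) i =>
      (acc.1 ++ [pvInnerA ls max_length (pvAppendLengthA (ls.getD i [])) (i + 1)],
       acc.2 ++ [((ls.getD i []).length : Int)]))
    ([], [])
  (res.1.map String.ofList, res.2)

-- ===== PORT B =====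

-- l.strip().ljust(len(l)) : ljust pads on the right with spaces (ported by hand; exact)
def pvAppendLengthB (line : List Char) : List Char :=
  PySem.Chars.strip line ++ List.replicate (line.length - (PySem.Chars.strip line).length) ' '

-- B's prefix-sum table: S = [0]; t = 0; for l in lines: t += len(l); S.append(t)
def pvBuildS (ls : List (List Char)) : List Int :=
  (ls.foldl (fun (p : List Int × Int) l =>
      (p.1 ++ [p.2 + (l.length : Int)], p.2 + (l.length : Int))) ([0], 0)).1

-- B's hand-written bisect_left loop: while lo < hi: mid = (lo+hi)//2; ...
def pvBisect (S : List Int) (target : Int) (lo hi : Nat) : Nat :=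
  if _h : lo < hi then
    if S.getD ((lo + hi) / 2) 0 < target then pvBisect S target ((lo + hi) / 2 + 1) hi
    else pvBisect S target lo ((lo + hi) / 2)
  else lo
  termination_by hi - lo
  decreasing_by all_goals omega

def concatenate_validation_alt (lines : List String) (max_length : Int) : List String × List Int :=
  let ls := lines.map String.toList
  let padded := ls.map pvAppendLengthB
  let S := pvBuildS ls
  let res := (List.range ls.length).foldl
    (fun (acc : List (List Char) × List Int) i =>
      let lo := pvBisect S (S.getD i 0 + max_length) 0 S.length
      let e := if lo - 2 < i then i else lo - 2
      (acc.1 ++ [((padded.drop i).take (e + 1 - i)).flatten],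
       acc.2 ++ [((ls.getD i []).length : Int)]))
    ([], [])
  (res.1.map String.ofList, res.2)

-- ===== PRECONDITION & SPEC =====
def Spec_concatenate_validation (lines : List String) (max_length : Int) (out : List String × List Int) : Prop := out = concatenate_validation_alt lines max_length
instance (lines : List String) (max_length : Int) (out : List String × List Int) : Decidable (Spec_concatenate_validation lines max_length out) := by unfold Spec_concatenate_validation; infer_instance

-- ===== CLAIM (what is proved, stated in full; the proofs are below) =====
def Claim_equal_concatenate_validation : Prop := ∀ (lines : List String) (max_length : Int), Dom_concatenate_validation lines max_length → Spec_concatenate_validation lines max_length (concatenate_validation lines max_length)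

-- ===== LEMMAS AND PROOFS =====

theorem pv_strip_len_le (l : List Char) : (PySem.Chars.strip l).length ≤ l.length := by
  simp only [PySem.Chars.strip, PySem.Chars.rstrip, PySem.Chars.lstrip, List.length_reverse]
  have h1 := List.length_dropWhile_le PySem.Chars.isspace (List.dropWhile PySem.Chars.isspace l).reverse
  have h2 := List.length_dropWhile_le PySem.Chars.isspace l
  simp only [List.length_reverse] at h1
  omega

-- the pad-while loop is right-padding with spaces
theorem pvPadLoopA_eq (c : List Char) (n : Nat) :
    pvPadLoopA c n = c ++ List.replicate (n - c.length) ' ' := by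
  fun_induction pvPadLoopA c n with
  | case1 c h ih =>
      rw [ih]
      have hrep : n - c.length = (n - (c ++ [' ']).length) + 1 := by
        simp only [List.length_append, List.length_singleton]; omega
      rw [hrep, List.replicate_succ, List.append_assoc]
      rfl
  | case2 c h =>
      have : n - c.length = 0 := by omega
      simp [this]

theorem pvAppendLength_eq (l : List Char) : pvAppendLengthA l = pvAppendLengthB l := by
  simp [pvAppendLengthA, pvAppendLengthB, pvPadLoopA_eq]

theorem pvAppendLengthB_len (l : List Char) : (pvAppendLengthB l).length = l.length := by
  have := pv_strip_len_le l
  simp only [pvAppendLengthB, List.length_append, List.length_replicate]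
  omega

-- the greedy group collector (characterisation of A's inner while loop)
def pvGrp (max_length : Int) (cl : Nat) : List (List Char) → List (List Char)
  | [] => []
  | t :: ts =>
      if ((cl + t.length : Nat) : Int) < max_length then t :: pvGrp max_length (cl + t.length) ts
      else []

theorem pvInnerA_eq_grp (ls : List (List Char)) (max_length : Int) (cur : List Char) (j : Nat) :
    pvInnerA ls max_length cur j
      = cur ++ (pvGrp max_length cur.length ((ls.drop j).map pvAppendLengthA)).flatten := by
  fun_induction pvInnerA ls max_length cur j with
  | case1 cur j h hc ih =>
      rw [ih, List.drop_eq_getElem_cons h, List.map_cons]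
      simp only [List.length_append] at hc
      simp only [pvGrp, hc, if_pos, List.flatten_cons, List.length_append, List.append_assoc]
  | case2 cur j h hc =>
      rw [List.drop_eq_getElem_cons h, List.map_cons]
      simp only [List.length_append] at hc
      simp only [pvGrp]
      rw [if_neg hc]
      simp
  | case3 cur j h =>
      have hd : ls.drop j = [] := List.drop_eq_nil_of_le (by omega)
      simp [hd, pvGrp]

-- sum of the lengths of the first k lines
def pvSig (ls : List (List Char)) (k : Nat) : Nat := ((ls.take k).map List.length).sum

theorem pvSig_mono (ls : List (List Char)) {a b : Nat} (h : a ≤ b) : pvSig ls a ≤ pvSig ls b := by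
  unfold pvSig
  rw [show b = a + (b - a) from by omega, List.take_add]
  simp

theorem pvSig_cons (l : List Char) (ls : List (List Char)) (k : Nat) :
    pvSig (l :: ls) (k + 1) = l.length + pvSig ls k := by
  simp [pvSig]

theorem pvSig_succ (ls : List (List Char)) (k : Nat) (h : k < ls.length) :
    pvSig ls (k + 1) = pvSig ls k + ls[k].length := by
  unfold pvSig
  rw [List.map_take, List.map_take,
    List.sum_take_succ (ls.map List.length) k (by simpa using h)]
  simp

-- greedy group = a take, given the boundary conditions
theorem pvGrp_eq_take (max_length : Int) :
    ∀ (ts : List (List Char)) (cl : Nat) (k : Nat),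
      (∀ u < k, ((cl + ((ts.take (u + 1)).map List.length).sum : Nat) : Int) < max_length) →
      k ≤ ts.length →
      (k < ts.length → ¬ (((cl + ((ts.take (k + 1)).map List.length).sum : Nat) : Int) < max_length)) →
      pvGrp max_length cl ts = ts.take k := by
  intro ts
  induction ts with
  | nil =>
      intro cl k h1 h2 h3
      simp only [List.length_nil, Nat.le_zero] at h2
      simp [h2, pvGrp]
  | cons t ts ihts =>
      intro cl k h1 h2 h3
      match k with
      | 0 =>
          have hx := h3 (by simp)
          simp only [List.take_succ_cons, List.take_zero, List.map_cons, List.map_nil,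
            List.sum_cons, List.sum_nil, Nat.add_zero] at hx
          simp only [pvGrp, List.take_zero]
          rw [if_neg hx]
      | k + 1 =>
          have hc := h1 0 (by omega)
          simp only [List.take_succ_cons, List.take_zero, List.map_cons, List.map_nil,
            List.sum_cons, List.sum_nil, Nat.add_zero] at hc
          simp only [pvGrp, hc, if_pos, List.take_succ_cons, List.cons.injEq, true_and]
          apply ihts
          · intro u hu
            have hh := h1 (u + 1) (by omega)
            simp only [List.take_succ_cons, List.map_cons, List.sum_cons] at hh
            have : cl + t.length + ((ts.take (u + 1)).map List.length).sum
                = cl + (t.length + ((ts.take (u + 1)).map List.length).sum) := by omega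
            rw [this]; exact hh
          · simpa using h2
          · intro hk
            have hh := h3 (by simpa using hk)
            simp only [List.take_succ_cons, List.map_cons, List.sum_cons] at hh
            have : cl + t.length + ((ts.take (k + 1)).map List.length).sum
                = cl + (t.length + ((ts.take (k + 1)).map List.length).sum) := by omega
            rw [this]; exact hh

-- the prefix-sum table is the table of pvSig values
theorem pvBuildS_foldl (ls : List (List Char)) :
    ∀ (p : List Int) (t : Int),
      (ls.foldl (fun (p : List Int × Int) l =>
        (p.1 ++ [p.2 + (l.length : Int)], p.2 + (l.length : Int))) (p, t))
      = (p ++ (List.range ls.length).map (fun k => t + (pvSig ls (k + 1) : Int)),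
         t + (pvSig ls ls.length : Int)) := by
  induction ls with
  | nil => intro p t; simp [pvSig]
  | cons l ls ih =>
      intro p t
      simp only [List.foldl_cons, ih]
      have hmap : (List.range (ls.length + 1)).map (fun k => t + (pvSig (l :: ls) (k + 1) : Int))
          = (t + (l.length : Int))
            :: (List.range ls.length).map (fun k => t + (l.length : Int) + (pvSig ls (k + 1) : Int)) := by
        rw [List.range_succ_eq_map, List.map_cons, List.map_map]
        refine congrArg₂ List.cons (by simp [pvSig]) ?_
        apply List.map_congr_left
        intro k _
        simp only [Function.comp_apply, Nat.succ_eq_add_one, pvSig_cons]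
        push_cast
        ring
      refine Prod.ext ?_ ?_
      · rw [List.length_cons, hmap, List.append_assoc, List.singleton_append]
      · rw [List.length_cons, pvSig_cons]
        push_cast
        ring

theorem pvBuildS_eq (ls : List (List Char)) :
    pvBuildS ls = (List.range (ls.length + 1)).map (fun k => (pvSig ls k : Int)) := by
  unfold pvBuildS
  rw [pvBuildS_foldl]
  rw [List.range_succ_eq_map]
  simp only [List.map_cons, List.map_map]
  have h0 : pvSig ls 0 = 0 := by simp [pvSig]
  rw [h0]
  simp only [Nat.cast_zero, List.singleton_append]
  congr 1
  apply List.map_congr_left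
  intro k _
  simp

theorem pvBuildS_len (ls : List (List Char)) : (pvBuildS ls).length = ls.length + 1 := by
  simp [pvBuildS_eq]

theorem pvBuildS_getD (ls : List (List Char)) (j : Nat) (h : j ≤ ls.length) :
    (pvBuildS ls).getD j 0 = (pvSig ls j : Int) := by
  rw [pvBuildS_eq]
  rw [List.getD_eq_getElem?_getD]
  rw [List.getElem?_map]
  rw [List.getElem?_range (by omega : j < ls.length + 1)]
  rfl

-- bisect invariant: on a monotone table it returns the boundary of 'value < target'
theorem pvBisect_inv (S : List Int) (target : Int)
    (mono : ∀ a b : Nat, a ≤ b → b < S.length → S.getD a 0 ≤ S.getD b 0)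
    (lo hi : Nat) :
    lo ≤ hi → hi ≤ S.length →
    (∀ j, j < lo → S.getD j 0 < target) →
    (∀ j, hi ≤ j → j < S.length → target ≤ S.getD j 0) →
    lo ≤ pvBisect S target lo hi ∧ pvBisect S target lo hi ≤ hi ∧
    (∀ j, j < pvBisect S target lo hi → S.getD j 0 < target) ∧
    (∀ j, pvBisect S target lo hi ≤ j → j < S.length → target ≤ S.getD j 0) := by
  fun_induction pvBisect S target lo hi with
  | case1 lo hi h hc ih =>
      intro hlh hhl hbelow habove
      have hmid : lo ≤ (lo + hi) / 2 ∧ (lo + hi) / 2 < hi := by omega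
      have step := ih (by omega) hhl
        (by
          intro j hj
          rcases Nat.lt_or_ge j ((lo + hi) / 2) with hj' | hj'
          · exact lt_of_le_of_lt (mono j ((lo + hi) / 2) (by omega) (by omega)) hc
          · have : j = (lo + hi) / 2 := by omega
            rw [this]; exact hc)
        habove
      exact ⟨by omega, step.2.1.trans (le_refl hi), step.2.2.1, step.2.2.2⟩
  | case2 lo hi h hc ih =>
      intro hlh hhl hbelow habove
      have step := ih (by omega) (by omega) hbelow
        (by
          intro j hj hj'
          have hm : target ≤ S.getD ((lo + hi) / 2) 0 := le_of_not_gt hc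
          exact hm.trans (mono ((lo + hi) / 2) j hj (by omega)))
      exact ⟨step.1, by omega, step.2.2.1, step.2.2.2⟩
  | case3 lo hi h =>
      intro hlh hhl hbelow habove
      exact ⟨le_refl lo, by omega, hbelow, fun j hj hj' => habove j (by omega) hj'⟩

-- both folds build (map f (range n), map g (range n))
theorem pv_foldl_pair {α β : Type} (f : Nat → α) (g : Nat → β) :
    ∀ (xs : List Nat) (a : List α) (b : List β),
      xs.foldl (fun acc i => (acc.1 ++ [f i], acc.2 ++ [g i])) (a, b)
        = (a ++ xs.map f, b ++ xs.map g) := by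
  intro xs
  induction xs with
  | nil => intro a b; simp
  | cons x xs ih => intro a b; simp [ih]

-- the per-start-index agreement of the two group computations
theorem pv_per_index (ls : List (List Char)) (max_length : Int) (i : Nat) (hi : i < ls.length) :
    pvInnerA ls max_length (pvAppendLengthA (ls.getD i [])) (i + 1)
      = ((((ls.map pvAppendLengthB).drop i).take
          ((if pvBisect (pvBuildS ls) ((pvBuildS ls).getD i 0 + max_length) 0 (pvBuildS ls).length - 2 < i
            then i
            else pvBisect (pvBuildS ls) ((pvBuildS ls).getD i 0 + max_length) 0 (pvBuildS ls).length - 2) + 1 - i))).flatten := by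
  have hn : (pvBuildS ls).length = ls.length + 1 := pvBuildS_len ls
  have hgetD : ∀ j, j ≤ ls.length → (pvBuildS ls).getD j 0 = (pvSig ls j : Int) :=
    fun j hj => pvBuildS_getD ls j hj
  have mono : ∀ a b : Nat, a ≤ b → b < (pvBuildS ls).length →
      (pvBuildS ls).getD a 0 ≤ (pvBuildS ls).getD b 0 := by
    intro a b hab hb
    rw [hgetD a (by omega), hgetD b (by omega)]
    exact_mod_cast pvSig_mono ls hab
  obtain ⟨_, hm1, hlt, hge⟩ :=
    pvBisect_inv (pvBuildS ls) ((pvBuildS ls).getD i 0 + max_length) mono 0 (pvBuildS ls).length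
      (by omega) le_rfl (by intro j hj; omega) (by intro j hj hj'; omega)
  set m := pvBisect (pvBuildS ls) ((pvBuildS ls).getD i 0 + max_length) 0 (pvBuildS ls).length with hm
  rw [hn] at hm1
  have hSig_i : (pvBuildS ls).getD i 0 = (pvSig ls i : Int) := hgetD i (by omega)
  have hlt' : ∀ j, j < m → (pvSig ls j : Int) < (pvSig ls i : Int) + max_length := by
    intro j hj
    have := hlt j hj
    rwa [hSig_i, hgetD j (by omega)] at this
  have hge' : ∀ j, m ≤ j → j ≤ ls.length → (pvSig ls i : Int) + max_length ≤ (pvSig ls j : Int) := by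
    intro j hj hj'
    have := hge j hj (by omega)
    rwa [hSig_i, hgetD j (by omega)] at this
  -- the endpoint
  set e := (if m - 2 < i then i else m - 2) with he
  have hei : i ≤ e := by rw [he]; split <;> omega
  -- lengths of padded lines
  have hmaplen : (ls.map pvAppendLengthB).map List.length = ls.map List.length := by
    rw [List.map_map]
    apply List.map_congr_left
    intro l _
    exact pvAppendLengthB_len l
  have hsum : ∀ v, i + 1 + v ≤ ls.length →
      pvSig ls (i + 1) + ((((ls.map pvAppendLengthB).drop (i + 1)).take v).map List.length).sum
        = pvSig ls (i + 1 + v) := by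
    intro v hv
    unfold pvSig
    rw [show ls.take (i + 1 + v) = ls.take (i + 1) ++ (ls.drop (i + 1)).take v from by
      rw [← List.take_add]]
    simp [List.map_append, List.sum_append, List.map_take, List.map_drop, hmaplen]
  -- left side
  rw [pvInnerA_eq_grp]
  have hgetDi : ls.getD i [] = ls[i] := List.getD_eq_getElem ls [] hi
  have hmapdrop : (ls.drop (i + 1)).map pvAppendLengthA = (ls.map pvAppendLengthB).drop (i + 1) := by
    rw [← List.map_drop]
    apply List.map_congr_left
    intro l _
    exact pvAppendLength_eq l
  rw [hgetDi, hmapdrop, pvAppendLength_eq]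
  have hcurlen : (pvAppendLengthB ls[i]).length = ls[i].length := pvAppendLengthB_len ls[i]
  rw [hcurlen]
  -- right side: split off the head, reduce to the greedy group
  have hdropi : (ls.map pvAppendLengthB).drop i
      = pvAppendLengthB ls[i] :: (ls.map pvAppendLengthB).drop (i + 1) := by
    rw [List.drop_eq_getElem_cons (by simpa using hi)]
    simp
  have htake : e + 1 - i = (e - i) + 1 := by omega
  rw [hdropi, htake, List.take_succ_cons, List.flatten_cons]
  congr 1
  -- the greedy group equals the take determined by the binary search
  refine congrArg List.flatten ?_
  apply pvGrp_eq_take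
  · -- every step inside the group still fits
    intro u hu
    have hue : u < e - i := hu
    have hmi : ¬ (m - 2 < i) := by
      by_contra hcon
      rw [he] at hue
      simp [hcon] at hue
    have he2 : e = m - 2 := by rw [he]; simp [hmi]
    have hbound : i + 2 + u ≤ ls.length := by omega
    have hs := hsum (u + 1) (by omega)
    have hidx : i + 1 + (u + 1) = i + 2 + u := by omega
    rw [hidx] at hs
    have hsig1 : pvSig ls (i + 1) = pvSig ls i + ls[i].length := pvSig_succ ls i hi
    have hfit := hlt' (i + 2 + u) (by omega)
    omega
  · -- the group stays inside the list
    have : (ls.map pvAppendLengthB).length = ls.length := by simp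
    simp only [List.length_drop, this]
    rw [he]; split <;> omega
  · -- the next line no longer fits (when it exists)
    intro hk
    have hklen : e - i < ls.length - (i + 1) := by simpa using hk
    have hs := hsum ((e - i) + 1) (by omega)
    have hidx : i + 1 + ((e - i) + 1) = i + 2 + (e - i) := by omega
    rw [hidx] at hs
    have hsig1 : pvSig ls (i + 1) = pvSig ls i + ls[i].length := pvSig_succ ls i hi
    have hmge : m ≤ i + 2 + (e - i) := by rw [he]; split <;> omega
    have hnofit := hge' (i + 2 + (e - i)) hmge (by omega)
    omega

-- ===== VERDICT (by name: the statement is the Claim_ definition above) =====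
theorem concatenate_validation_spec : Claim_equal_concatenate_validation := by
  intro lines max_length _dom
  unfold Spec_concatenate_validation concatenate_validation concatenate_validation_alt
  dsimp only
  rw [pv_foldl_pair, pv_foldl_pair]
  simp only [List.nil_append]
  refine Prod.ext ?_ rfl
  dsimp only
  congr 1
  apply List.map_congr_left
  intro i hmem
  have hi : i < (lines.map String.toList).length := by
    simpa using List.mem_range.mp hmem
  exact pv_per_index (lines.map String.toList) max_length i hi
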